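-- pv_equiv track=rewrite | github.com/FlourishMa/Cryptography | cryptography.py | monoalphabetic_cipher
-- ===== SOURCE A (Python) =====
-- def generate_inverse_key(key):
--     """
--     Generates the inverse key for decryption.
--     """
--     return {v: k for k, v in key.items()}
--
-- def monoalphabetic_cipher(text, key, decrypt=False):
--     """
--     Encrypts or decrypts text using a monoalphabetic substitution cipher.
--     """
--     if decrypt:
--         key = generate_inverse_key(key)
--
--     result = []
--     for char in text:
--         if char.lower() in key:
--             substitution_char = key[char.lower()]
--             if char.isupper():
--                 result.append(substitution_char.upper())
--             else:
--                 result.append(substitution_char)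
--         else:
--             result.append(char)
--     return "".join(result)
-- ===== SOURCE B (Python) =====
-- def monoalphabetic_cipher(text, key, decrypt=False):
--     """
--     Encrypts or decrypts text using a monoalphabetic substitution cipher,
--     via a single precomputed str.translate table (case folded into the table).
--     """
--     if decrypt:
--         key = {v: k for k, v in key.items()}
--     table = {}
--     for k, v in key.items():
--         if len(k) == 1 and k == k.lower():
--             table[ord(k)] = v
--             u = k.upper()
--             if u != k:
--                 table[ord(u)] = v.upper()
--     return text.translate(table)
-- ===== Notes on version B (the rewrite author's own statement) =====
-- stated objective: faster
-- what changed: Instead of branching on case and membership for every character, B precomputes one ord->string translation table from the (possibly inverted) key, folding the uppercase handling into extra table entries, and then does a single text.translate(table) pass.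
import Mathlib
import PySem

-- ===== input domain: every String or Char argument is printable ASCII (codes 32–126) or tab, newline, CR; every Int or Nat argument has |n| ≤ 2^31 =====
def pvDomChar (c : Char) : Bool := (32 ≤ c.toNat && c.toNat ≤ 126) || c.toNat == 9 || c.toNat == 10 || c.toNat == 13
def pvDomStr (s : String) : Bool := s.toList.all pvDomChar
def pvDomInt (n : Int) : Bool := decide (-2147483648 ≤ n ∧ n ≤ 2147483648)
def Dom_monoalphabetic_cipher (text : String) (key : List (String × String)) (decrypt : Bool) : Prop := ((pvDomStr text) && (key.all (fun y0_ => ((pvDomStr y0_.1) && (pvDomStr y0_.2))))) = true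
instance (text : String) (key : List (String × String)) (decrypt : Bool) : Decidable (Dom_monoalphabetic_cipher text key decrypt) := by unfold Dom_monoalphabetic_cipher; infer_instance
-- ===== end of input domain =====

-- B replaces A's per-character case analysis by one precomputed translation table
-- (case handling folded into the table) and a single translate pass; objective: idiomatic.

-- ===== PORT A =====
-- literal port of generate_inverse_key: {v: k for k, v in key.items()}
def generate_inverse_key (key : PySem.Dict String String) : PySem.Dict String String :=
  key.items.foldl (fun acc kv => acc.insert kv.2 kv.1) PySem.Dict.empty

-- the body of A's `for char in text` loop (char.lower() on a 1-char string = lowerChar)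
def pvSubstitute (key : PySem.Dict String String) (result : List String) (char : Char) : List String :=
  match key.get? (String.ofList [PySem.Chars.lowerChar char]) with
  | some substitution_char =>
      if PySem.Chars.isupper char then result ++ [PySem.Str.upper substitution_char]
      else result ++ [substitution_char]
  | none => result ++ [String.ofList [char]]

def monoalphabetic_cipher (text : String) (key : List (String × String)) (decrypt : Bool) : String :=
  let key0 : PySem.Dict String String := PySem.Dict.ofList key
  let key1 := if decrypt then generate_inverse_key key0 else key0
  let result : List String := text.toList.foldl (pvSubstitute key1) []
  PySem.Str.join "" result

-- ===== PORT B =====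
-- the body of B's table-building loop; Python keys the table by ord(k) — the
-- code point — which we model by the Char itself (an exact bijection).
def pvTableStep (table : PySem.Dict Char String) (kv : String × String) : PySem.Dict Char String :=
  match kv.1.toList with
  | [k] =>
      if PySem.Chars.lowerChar k = k then
        let t := table.insert k kv.2
        if PySem.Chars.upperChar k ≠ k then
          t.insert (PySem.Chars.upperChar k) (PySem.Str.upper kv.2)
        else t
      else table
  | _ => table

-- str.translate: each code point is replaced by its table entry (a string), else kept
def pvTranslate (table : PySem.Dict Char String) (acc : List Char) (c : Char) : List Char :=
  match table.get? c with
  | some v => acc ++ v.toList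
  | none => acc ++ [c]

def monoalphabetic_cipher_alt (text : String) (key : List (String × String)) (decrypt : Bool) : String :=
  let key0 : PySem.Dict String String := PySem.Dict.ofList key
  let key1 := if decrypt then key0.items.foldl (fun acc kv => acc.insert kv.2 kv.1) PySem.Dict.empty else key0
  let table : PySem.Dict Char String := key1.items.foldl pvTableStep PySem.Dict.empty
  String.ofList (text.toList.foldl (pvTranslate table) [])

-- ===== PRECONDITION & SPEC =====
def Spec_monoalphabetic_cipher (text : String) (key : List (String × String)) (decrypt : Bool) (out : String) : Prop := out = monoalphabetic_cipher_alt text key decrypt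
instance (text : String) (key : List (String × String)) (decrypt : Bool) (out : String) : Decidable (Spec_monoalphabetic_cipher text key decrypt out) := by unfold Spec_monoalphabetic_cipher; infer_instance

-- ===== CLAIM (what is proved, stated in full; the proofs are below) =====
def Claim_equal_monoalphabetic_cipher : Prop := ∀ (text : String) (key : List (String × String)) (decrypt : Bool), Dom_monoalphabetic_cipher text key decrypt → Spec_monoalphabetic_cipher text key decrypt (monoalphabetic_cipher text key decrypt)

-- ===== LEMMAS AND PROOFS =====

-- ASCII character facts (PySem's lowerChar/upperChar/isupper are ASCII-exact on every Char)
lemma pv_toNat_ofNat (n : Nat) (h : n < 55296) : (Char.ofNat n).toNat = n := by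
  rw [Char.toNat_ofNat, if_pos (Or.inl h)]

lemma pv_char_le_iff (c d : Char) : (c ≤ d) ↔ c.toNat ≤ d.toNat := by
  rw [Char.le_def, UInt32.le_iff_toNat_le]; exact Iff.rfl

lemma pv_char_eq_of_toNat {c d : Char} (h : c.toNat = d.toNat) : c = d := by
  have := congrArg Char.ofNat h
  rwa [Char.ofNat_toNat, Char.ofNat_toNat] at this

lemma pv_isupper_iff (c : Char) : PySem.Chars.isupper c = true ↔ 65 ≤ c.toNat ∧ c.toNat ≤ 90 := by
  simp [PySem.Chars.isupper, pv_char_le_iff]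

lemma pv_islower_iff (c : Char) : PySem.Chars.islower c = true ↔ 97 ≤ c.toNat ∧ c.toNat ≤ 122 := by
  simp [PySem.Chars.islower, pv_char_le_iff]

-- lowerChar is idempotent
lemma pv_lower_idem (c : Char) :
    PySem.Chars.lowerChar (PySem.Chars.lowerChar c) = PySem.Chars.lowerChar c := by
  unfold PySem.Chars.lowerChar
  split_ifs with h1 h2 <;> try rfl
  exfalso
  rw [pv_isupper_iff] at h1 h2
  rw [pv_toNat_ofNat (c.toNat + 32) (by omega)] at h2
  omega

-- isupper c ↔ lowerChar moves c
lemma pv_isupper_iff_lower_ne (c : Char) :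
    PySem.Chars.isupper c = true ↔ PySem.Chars.lowerChar c ≠ c := by
  unfold PySem.Chars.lowerChar
  split_ifs with h
  · simp only [h, true_iff]
    intro he
    have := congrArg Char.toNat he
    rw [pv_toNat_ofNat (c.toNat + 32) (by rw [pv_isupper_iff] at h; omega)] at this
    omega
  · simp [h]

-- upperChar moves k → lowerChar (upperChar k) = k and upperChar k is uppercase
lemma pv_upper_ne_imp (k : Char) (h : PySem.Chars.upperChar k ≠ k) :
    PySem.Chars.lowerChar (PySem.Chars.upperChar k) = k ∧
      PySem.Chars.isupper (PySem.Chars.upperChar k) = true := by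
  unfold PySem.Chars.upperChar at *
  by_cases hl : PySem.Chars.islower k = true
  · rw [if_pos hl] at *
    rw [pv_islower_iff] at hl
    have ht : (Char.ofNat (k.toNat - 32)).toNat = k.toNat - 32 :=
      pv_toNat_ofNat _ (by omega)
    have hu : PySem.Chars.isupper (Char.ofNat (k.toNat - 32)) = true := by
      rw [pv_isupper_iff, ht]; omega
    refine ⟨?_, hu⟩
    unfold PySem.Chars.lowerChar
    rw [if_pos hu]
    apply pv_char_eq_of_toNat
    rw [pv_toNat_ofNat _ (by rw [ht]; omega), ht]
    omega
  · rw [if_neg hl] at h; exact absurd rfl h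

-- isupper c → upperChar (lowerChar c) = c
lemma pv_upper_lower (c : Char) (h : PySem.Chars.isupper c = true) :
    PySem.Chars.upperChar (PySem.Chars.lowerChar c) = c := by
  unfold PySem.Chars.lowerChar
  rw [if_pos h]
  rw [pv_isupper_iff] at h
  have ht : (Char.ofNat (c.toNat + 32)).toNat = c.toNat + 32 := pv_toNat_ofNat _ (by omega)
  unfold PySem.Chars.upperChar
  rw [if_pos (by rw [pv_islower_iff, ht]; omega)]
  apply pv_char_eq_of_toNat
  rw [pv_toNat_ofNat _ (by rw [ht]; omega), ht]
  omega

-- what one table-building step does to one lookup slot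
lemma pv_step_get (t : PySem.Dict Char String) (k v : String) (c : Char) :
    (pvTableStep t (k, v)).get? c =
      if k = String.ofList [PySem.Chars.lowerChar c] then
        some (if PySem.Chars.isupper c then PySem.Str.upper v else v)
      else t.get? c := by
  have hkey : k = String.ofList [PySem.Chars.lowerChar c] ↔ k.toList = [PySem.Chars.lowerChar c] := by
    constructor
    · intro h; rw [h]; simp
    · intro h; apply String.ext; simp [h]
  unfold pvTableStep
  rcases hk : k.toList with _ | ⟨a, _ | ⟨b, r⟩⟩
  · rw [if_neg (hkey.not.2 (by rw [hk]; simp))]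
  · show (if PySem.Chars.lowerChar a = a then
          if PySem.Chars.upperChar a ≠ a then
            (t.insert a v).insert (PySem.Chars.upperChar a) (PySem.Str.upper v)
          else t.insert a v
        else t).get? c = _
    by_cases hfix : PySem.Chars.lowerChar a = a
    · rw [if_pos hfix]
      by_cases heq : a = PySem.Chars.lowerChar c
      · have hks : k = String.ofList [PySem.Chars.lowerChar c] := hkey.2 (by rw [hk, heq])
        rw [if_pos hks]
        by_cases hup : PySem.Chars.isupper c = true
        · -- c is uppercase: slot c is upperChar a
          have hc : PySem.Chars.upperChar a = c := by rw [heq]; exact pv_upper_lower c hup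
          have hca : c ≠ a := fun he =>
            (pv_isupper_iff_lower_ne c).1 hup (by rw [← heq, he])
          have hne : PySem.Chars.upperChar a ≠ a := by rw [hc]; exact hca
          rw [if_pos hne, hc, PySem.Dict.get?_insert_self, if_pos hup]
        · -- c is not uppercase: lowerChar c = c, slot c is a itself
          have hcc : PySem.Chars.lowerChar c = c := by
            by_contra hne; exact hup ((pv_isupper_iff_lower_ne c).2 hne)
          have hac : a = c := by rw [heq, hcc]
          by_cases hne : PySem.Chars.upperChar a ≠ a
          · have hcu : c ≠ PySem.Chars.upperChar a := by
              rw [← hac]; exact fun he => hne he.symm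
            rw [if_pos hne, PySem.Dict.get?_insert_of_ne _ _ hcu, hac,
              PySem.Dict.get?_insert_self, if_neg hup]
          · rw [if_neg hne, hac, PySem.Dict.get?_insert_self, if_neg hup]
      · -- a ≠ lowerChar c: this step never touches slot c
        have hkn : ¬ k = String.ofList [PySem.Chars.lowerChar c] :=
          hkey.not.2 (by rw [hk]; simp [heq])
        rw [if_neg hkn]
        have hca : c ≠ a := fun he => heq (by rw [← he] at hfix ⊢; exact hfix.symm)
        by_cases hne : PySem.Chars.upperChar a ≠ a
        · obtain ⟨hla, _⟩ := pv_upper_ne_imp a hne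
          have hcu : c ≠ PySem.Chars.upperChar a := fun he => heq (by rw [← hla, ← he])
          rw [if_pos hne, PySem.Dict.get?_insert_of_ne _ _ hcu,
            PySem.Dict.get?_insert_of_ne _ _ hca]
        · rw [if_neg hne, PySem.Dict.get?_insert_of_ne _ _ hca]
    · rw [if_neg hfix,
        if_neg (hkey.not.2 (by
          rw [hk]
          intro he
          injection he with he1 _
          exact hfix (by rw [he1]; exact pv_lower_idem c)))]
  · rw [if_neg (hkey.not.2 (by rw [hk]; simp))]

-- last-match association lookup (later items of the fold overwrite earlier ones)
def pvLastGet : List (String × String) → String → Option String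
  | [], _ => none
  | kv :: r, s =>
      match pvLastGet r s with
      | some w => some w
      | none => if kv.1 = s then some kv.2 else none

lemma pv_foldl_table_get (l : List (String × String)) (t : PySem.Dict Char String) (c : Char) :
    (l.foldl pvTableStep t).get? c =
      match pvLastGet l (String.ofList [PySem.Chars.lowerChar c]) with
      | some v => some (if PySem.Chars.isupper c then PySem.Str.upper v else v)
      | none => t.get? c := by
  induction l generalizing t with
  | nil => rfl
  | cons kv r ih =>
    rw [List.foldl_cons, ih]
    rcases h : pvLastGet r (String.ofList [PySem.Chars.lowerChar c]) with _ | w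
    · simp only [pvLastGet, h]
      rcases kv with ⟨k, v⟩
      rw [pv_step_get]
      by_cases he : k = String.ofList [PySem.Chars.lowerChar c] <;> simp [he]
    · simp [pvLastGet, h]

lemma pv_lastGet_none (l : List (String × String)) (s : String) (h : s ∉ l.map Prod.fst) :
    pvLastGet l s = none := by
  induction l with
  | nil => rfl
  | cons kv r ih =>
    simp only [List.map_cons, List.mem_cons, not_or] at h
    simp only [pvLastGet, ih h.2]
    rw [if_neg (fun he => h.1 he.symm)]

lemma pv_lastGet_eq_get? (l : List (String × String)) (h : (l.map Prod.fst).Nodup) (s : String) :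
    pvLastGet l s = (PySem.Dict.mk l).get? s := by
  induction l with
  | nil => rfl
  | cons kv r ih =>
    rcases kv with ⟨k, v⟩
    simp only [List.map_cons, List.nodup_cons] at h
    rw [PySem.Dict.get?_mk_cons]
    by_cases he : k = s
    · subst he
      simp only [pvLastGet, pv_lastGet_none r k h.1, beq_self_eq_true, if_true]
    · simp only [pvLastGet, ih h.2, beq_iff_eq, if_neg he]
      rcases (PySem.Dict.mk r).get? s with _ | w <;> rfl

-- the table lookup agrees with A's per-character case analysis
lemma pv_table_get_char (d : PySem.Dict String String) (hd : d.keys.Nodup) (c : Char) :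
    (d.items.foldl pvTableStep PySem.Dict.empty).get? c =
      Option.map (fun v => if PySem.Chars.isupper c then PySem.Str.upper v else v)
        (d.get? (String.ofList [PySem.Chars.lowerChar c])) := by
  rw [pv_foldl_table_get]
  rw [pv_lastGet_eq_get? d.items (by simpa [PySem.Dict.keys] using hd)]
  have hmk : PySem.Dict.mk d.items = d := rfl
  rw [hmk]
  rcases d.get? (String.ofList [PySem.Chars.lowerChar c]) with _ | v
  · simp [PySem.Dict.empty, PySem.Dict.get?]
  · simp

lemma pv_join_nil_flatten (parts : List (List Char)) :
    PySem.Chars.join [] parts = parts.flatten := by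
  induction parts with
  | nil => simp [PySem.Chars.join_nil]
  | cons p rest ih =>
    cases rest with
    | nil => simp [PySem.Chars.join_singleton]
    | cons q r => rw [PySem.Chars.join_cons_cons]; simp_all

-- the heart of the equivalence: for ANY dict with distinct keys, A's per-character
-- branching loop and B's translate-through-the-precomputed-table produce the same string
lemma pv_main (d : PySem.Dict String String) (hd : d.keys.Nodup) (text : String) :
    PySem.Str.join "" (text.toList.foldl (pvSubstitute d) []) =
      String.ofList (text.toList.foldl
        (pvTranslate (d.items.foldl pvTableStep PySem.Dict.empty)) []) := by
  apply String.ext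
  have hA : ∀ acc c, pvSubstitute d acc c = acc ++
      [match d.get? (String.ofList [PySem.Chars.lowerChar c]) with
       | some v => if PySem.Chars.isupper c then PySem.Str.upper v else v
       | none => String.ofList [c]] := by
    intro acc c
    unfold pvSubstitute
    rcases d.get? (String.ofList [PySem.Chars.lowerChar c]) with _ | v
    · rfl
    · by_cases h : PySem.Chars.isupper c <;> simp [h]
  have hB : ∀ acc c, pvTranslate (d.items.foldl pvTableStep PySem.Dict.empty) acc c = acc ++
      (match d.get? (String.ofList [PySem.Chars.lowerChar c]) with
       | some v => (if PySem.Chars.isupper c then PySem.Str.upper v else v).toList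
       | none => [c]) := by
    intro acc c
    unfold pvTranslate
    rw [pv_table_get_char d hd c]
    rcases d.get? (String.ofList [PySem.Chars.lowerChar c]) with _ | v <;> rfl
  rw [funext fun acc => funext fun c => hA acc c,
      funext fun acc => funext fun c => hB acc c]
  rw [PySem.List.foldl_append_singleton_eq_map, PySem.List.foldl_append_eq_flatMap]
  rw [PySem.Str.toList_join, String.toList_ofList]
  simp only [String.toList_ofList, pv_join_nil_flatten, List.nil_append,
    List.map_map, List.flatMap_def]
  congr 1
  apply List.map_congr_left
  intro c _
  simp only [Function.comp]
  rcases d.get? (String.ofList [PySem.Chars.lowerChar c]) with _ | v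
  · simp
  · rfl

-- ===== VERDICT (by name: the statement is the Claim_ definition above) =====
theorem monoalphabetic_cipher_spec : Claim_equal_monoalphabetic_cipher := by
  intro text key decrypt _
  unfold Spec_monoalphabetic_cipher monoalphabetic_cipher monoalphabetic_cipher_alt generate_inverse_key
  cases decrypt
  · exact pv_main _ (PySem.Dict.nodup_keys_ofList key) text
  · exact pv_main _
      (PySem.Dict.nodup_keys_foldl_insert_key _ Prod.snd (fun _ kv => kv.1) _
        PySem.Dict.nodup_keys_empty) text
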